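-- pv_equiv track=rewrite | github.com/standard-chartered/stratus-safecloud | batch/cache_aws_security_data.py | check_for_unknown
-- ===== SOURCE A (Python) =====
-- def check_for_unknown(finding_list):
--     # Unknown - indicates that one of the following is true:
--     #    * There are no findings
--     #    * All findings have a Workflow.Status of SUPPRESSED. Because SUPPRESSED findings are ignored, this is equivalent to no findings.
--     #    * No findings are FAILED. At least one finding has a Compliance.Status of WARNING or NOT_AVAILABLE
--     #      and does not have a Workflow.Status of RESOLVED or SUPPRESSED.
--     if len(finding_list) == 0:
--         no_findings = True
--     else:
--         no_findings = False
--     suppressed = all(d['workflow'] == 'SUPPRESSED' for d in finding_list)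
--     no_failures = not any(d['compliance'] == 'FAILED' for d in finding_list)
--     warning = any((d['compliance'] == 'WARNING' or d['compliance'] == 'NOT_AVAILABLE')
--                   and not (d['workflow'] == 'RESOLVED' or d['workflow'] == 'SUPPRESSED') for d in finding_list)
--     result = no_findings or suppressed or (no_failures and warning)
--     return result
-- ===== SOURCE B (Python) =====
-- def _severity(d):
--     # 2 = failed compliance, 1 = warning/not_available still active, 0 = benign
--     if d['compliance'] == 'FAILED':
--         return 2
--     if d['compliance'] in ('WARNING', 'NOT_AVAILABLE') and d['workflow'] not in ('RESOLVED', 'SUPPRESSED'):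
--         return 1
--     return 0
--
-- def check_for_unknown(finding_list):
--     # Map each finding to a severity level and take the max over the list,
--     # also noting whether any finding is not suppressed; the status is unknown
--     # iff nothing is active or the top severity is exactly 1 (warning, no failure).
--     top = 0
--     any_active = False
--     for d in finding_list:
--         if d['workflow'] != 'SUPPRESSED':
--             any_active = True
--         top = max(top, _severity(d))
--     return (not any_active) or top == 1
-- ===== Notes on version B (the rewrite author's own statement) =====
-- stated objective: alternative
-- what changed: Maps each finding to a numeric severity level (2=failed, 1=active warning, 0=benign), folds with max plus an any-non-suppressed flag, and reads the answer off the lattice value (top == 1) instead of combining A's three boolean scans.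
import Mathlib
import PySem

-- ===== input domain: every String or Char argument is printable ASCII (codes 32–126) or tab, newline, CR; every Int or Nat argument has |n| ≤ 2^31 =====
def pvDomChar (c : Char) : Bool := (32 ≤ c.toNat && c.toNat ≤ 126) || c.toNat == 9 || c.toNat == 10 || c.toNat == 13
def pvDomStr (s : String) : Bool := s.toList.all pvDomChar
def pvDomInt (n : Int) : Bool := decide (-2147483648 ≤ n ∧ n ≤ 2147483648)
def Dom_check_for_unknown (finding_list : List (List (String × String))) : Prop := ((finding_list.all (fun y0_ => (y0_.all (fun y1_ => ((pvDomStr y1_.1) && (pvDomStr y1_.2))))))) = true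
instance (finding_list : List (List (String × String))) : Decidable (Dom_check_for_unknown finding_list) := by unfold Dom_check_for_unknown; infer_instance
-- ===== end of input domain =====

-- B maps each finding to a numeric severity and takes the max (plus one any-non-suppressed flag), reading the answer off that lattice value instead of A's three boolean scans (objective: alternative, same O(n) cost).


-- ===== PORT A =====
-- d['workflow'] / d['compliance'] (first-match lookup on the assoc list); Pre_ guarantees the keys
-- are present, so getD "" is exact there (Python raises KeyError on a missing key).
def pvGetKey (d : List (String × String)) (k : String) : String :=
  ((d.lookup k).getD "")

def check_for_unknown (finding_list : List (List (String × String))) : Bool :=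
  let no_findings := finding_list.length == 0
  let suppressed := finding_list.all (fun d => pvGetKey d "workflow" == "SUPPRESSED")
  let no_failures := !(finding_list.any (fun d => pvGetKey d "compliance" == "FAILED"))
  let warning := finding_list.any (fun d =>
    (pvGetKey d "compliance" == "WARNING" || pvGetKey d "compliance" == "NOT_AVAILABLE")
      && !(pvGetKey d "workflow" == "RESOLVED" || pvGetKey d "workflow" == "SUPPRESSED"))
  no_findings || suppressed || (no_failures && warning)

-- ===== PORT B =====
-- per-finding severity level: 2 = failed, 1 = active warning, 0 = benign
def sevB (d : List (String × String)) : Nat :=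
  if pvGetKey d "compliance" == "FAILED" then 2
  else if (pvGetKey d "compliance" == "WARNING" || pvGetKey d "compliance" == "NOT_AVAILABLE")
            && !(pvGetKey d "workflow" == "RESOLVED" || pvGetKey d "workflow" == "SUPPRESSED") then 1
  else 0

-- loop state = (top severity so far, any non-suppressed finding seen)
def sevStep (s : Nat × Bool) (d : List (String × String)) : Nat × Bool :=
  (max s.1 (sevB d),
   if !(pvGetKey d "workflow" == "SUPPRESSED") then true else s.2)

def check_for_unknown_alt (finding_list : List (List (String × String))) : Bool :=
  let s := finding_list.foldl sevStep (0, false)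
  !s.2 || (s.1 == 1)

-- ===== PRECONDITION & SPEC =====
-- Pre_: every finding has both keys; on a dict missing 'workflow' or 'compliance' Python A raises KeyError.
def Pre_check_for_unknown (finding_list : List (List (String × String))) : Prop :=
  ∀ d ∈ finding_list, (d.lookup "workflow").isSome ∧ (d.lookup "compliance").isSome
instance (finding_list : List (List (String × String))) : Decidable (Pre_check_for_unknown finding_list) := by unfold Pre_check_for_unknown; infer_instance
def pvWitness_check_for_unknown : (List (List (String × String))) :=
  [[("workflow", "SUPPRESSED"), ("compliance", "PASSED")]]
def Spec_check_for_unknown (finding_list : List (List (String × String))) (out : Bool) : Prop := out = check_for_unknown_alt finding_list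
instance (finding_list : List (List (String × String))) (out : Bool) : Decidable (Spec_check_for_unknown finding_list out) := by unfold Spec_check_for_unknown; infer_instance

-- ===== CLAIM (what is proved, stated in full; the proofs are below) =====
def Claim_equal_check_for_unknown : Prop := ∀ (finding_list : List (List (String × String))), Dom_check_for_unknown finding_list → Pre_check_for_unknown finding_list → Spec_check_for_unknown finding_list (check_for_unknown finding_list)

-- ===== LEMMAS AND PROOFS =====
-- the fold splits into a max of severities and an 'any non-suppressed' scan
theorem sevFold_eq (fl : List (List (String × String))) (s : Nat × Bool) :
    fl.foldl sevStep s =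
      (fl.foldl (fun t d => max t (sevB d)) s.1,
       s.2 || fl.any (fun d => !(pvGetKey d "workflow" == "SUPPRESSED"))) := by
  induction fl generalizing s with
  | nil => simp
  | cons d tl ih =>
    simp only [List.foldl_cons, List.any_cons, ih, sevStep]
    cases h : (!(pvGetKey d "workflow" == "SUPPRESSED")) <;> cases hs : s.2 <;> simp [h, hs]

-- the accumulator of the max-fold pulls out
theorem maxFold_out (fl : List (List (String × String))) (t : Nat) :
    fl.foldl (fun t d => max t (sevB d)) t
      = max t (fl.foldl (fun t d => max t (sevB d)) 0) := by
  induction fl generalizing t with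
  | nil => simp
  | cons d tl ih =>
    simp only [List.foldl_cons]
    rw [ih (max t (sevB d)), ih (max 0 (sevB d))]
    simp [max_assoc]

theorem sevB_cases (d : List (String × String)) :
    (sevB d = 2 ∧ (pvGetKey d "compliance" == "FAILED") = true)
  ∨ (sevB d = 1 ∧ (pvGetKey d "compliance" == "FAILED") = false
      ∧ ((pvGetKey d "compliance" == "WARNING" || pvGetKey d "compliance" == "NOT_AVAILABLE")
          && !(pvGetKey d "workflow" == "RESOLVED" || pvGetKey d "workflow" == "SUPPRESSED")) = true)
  ∨ (sevB d = 0 ∧ (pvGetKey d "compliance" == "FAILED") = false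
      ∧ ((pvGetKey d "compliance" == "WARNING" || pvGetKey d "compliance" == "NOT_AVAILABLE")
          && !(pvGetKey d "workflow" == "RESOLVED" || pvGetKey d "workflow" == "SUPPRESSED")) = false) := by
  unfold sevB; split_ifs with h1 h2 <;> simp_all

theorem sevB_le_two (d : List (String × String)) : sevB d ≤ 2 := by
  unfold sevB; split_ifs <;> omega

theorem maxSev_le_two (fl : List (List (String × String))) :
    fl.foldl (fun t d => max t (sevB d)) 0 ≤ 2 := by
  induction fl with
  | nil => simp
  | cons d tl ih =>
    simp only [List.foldl_cons]
    rw [maxFold_out]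
    have := sevB_le_two d
    simp only [max_le_iff]
    omega

-- joint characterisation: a failure exists iff the top severity is 2, and the
-- top severity is 1 iff there is no failure but an active warning
theorem maxSev_char (fl : List (List (String × String))) :
    ((fl.any (fun d => pvGetKey d "compliance" == "FAILED"))
        = (fl.foldl (fun t d => max t (sevB d)) 0 == 2))
  ∧ ((fl.foldl (fun t d => max t (sevB d)) 0 == 1)
        = (!(fl.any (fun d => pvGetKey d "compliance" == "FAILED"))
          && fl.any (fun d =>
            (pvGetKey d "compliance" == "WARNING" || pvGetKey d "compliance" == "NOT_AVAILABLE")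
              && !(pvGetKey d "workflow" == "RESOLVED" || pvGetKey d "workflow" == "SUPPRESSED")))) := by
  induction fl with
  | nil => simp
  | cons d tl ih =>
    obtain ⟨ihF, ihW⟩ := ih
    have hM := maxSev_le_two tl
    simp only [List.any_cons, List.foldl_cons]
    rw [maxFold_out, Nat.zero_max]
    rcases sevB_cases d with ⟨h, hf⟩ | ⟨h, hf, hw⟩ | ⟨h, hf, hw⟩ <;>
      cases hB : tl.any (fun d => pvGetKey d "compliance" == "FAILED") <;>
      cases hA : tl.any (fun d =>
        (pvGetKey d "compliance" == "WARNING" || pvGetKey d "compliance" == "NOT_AVAILABLE")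
          && !(pvGetKey d "workflow" == "RESOLVED" || pvGetKey d "workflow" == "SUPPRESSED")) <;>
      rw [hB] at ihF <;> rw [hB, hA] at ihW <;>
      simp only [h, hf, hB, hA] <;>
      constructor <;>
      rw [Bool.eq_iff_iff] <;> rw [Nat.max_def] <;> split_ifs <;>
      (try simp_all) <;> omega

-- ===== VERDICT (by name: the statement is the Claim_ definition above) =====
theorem check_for_unknown_spec : Claim_equal_check_for_unknown := by
  intro fl _ _
  unfold Spec_check_for_unknown check_for_unknown check_for_unknown_alt
  rw [sevFold_eq]
  simp only [Bool.false_or]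
  rw [(maxSev_char fl).2]
  cases fl with
  | nil => simp
  | cons d tl => simp [List.all_eq_not_any_not]
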